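-- pv_equiv track=rewrite | github.com/amillionhornets/Java | DS Sem 1/Homework_7/Clark116.py | findRedTiles
-- ===== SOURCE A (Python) =====
-- def findRedTiles(greyTiles, patterns, curr):
--     if checkTilesRed(greyTiles) and greyTiles not in patterns:
--         patterns.append(greyTiles[:])
--     if curr >= len(greyTiles):
--         return patterns
--     if curr + 1 < len(greyTiles) and greyTiles[curr] == 0 and greyTiles[curr + 1] == 0:
--         greyTiles[curr] = 1
--         greyTiles[curr + 1] = 1
--         findRedTiles(greyTiles, patterns, curr + 2)
--
--         greyTiles[curr] = 0
--         greyTiles[curr + 1] = 0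
--     findRedTiles(greyTiles, patterns, curr+1)
--     return patterns
--
-- def checkTilesRed(greyTiles):
--     redCount = 0
--     for i in range(len(greyTiles) - 1):
--         if(greyTiles[i] == 1 and greyTiles[i + 1] == 1):
--             redCount+=1
--     return(redCount >= 1)
-- ===== SOURCE B (Python) =====
-- def findRedTiles(greyTiles, patterns, curr):
--     # Iterative DFS with an explicit stack of (board, curr) frames;
--     # reproduces A's pre-order (place-branch explored before skip-branch).
--     n = len(greyTiles)
--     stack = [(list(greyTiles), curr)]
--     while stack:
--         board, c = stack.pop()
--         if any(board[i] == 1 and board[i + 1] == 1 for i in range(n - 1)) and board not in patterns: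
--             patterns.append(list(board))
--         if c >= n:
--             continue
--         stack.append((board, c + 1))
--         if c + 1 < n and board[c] == 0 and board[c + 1] == 0:
--             nb = list(board)
--             nb[c] = 1
--             nb[c + 1] = 1
--             stack.append((nb, c + 2))
--     return patterns
-- ===== Notes on version B (the rewrite author's own statement) =====
-- stated objective: alternative
-- what changed: The recursive backtracking search with in-place mutate/undo is replaced by an iterative DFS over an explicit stack of (board, curr) frames that pushes the skip frame first and an already-modified copy for the place frame second, so no undo step exists.
import Mathlib
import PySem

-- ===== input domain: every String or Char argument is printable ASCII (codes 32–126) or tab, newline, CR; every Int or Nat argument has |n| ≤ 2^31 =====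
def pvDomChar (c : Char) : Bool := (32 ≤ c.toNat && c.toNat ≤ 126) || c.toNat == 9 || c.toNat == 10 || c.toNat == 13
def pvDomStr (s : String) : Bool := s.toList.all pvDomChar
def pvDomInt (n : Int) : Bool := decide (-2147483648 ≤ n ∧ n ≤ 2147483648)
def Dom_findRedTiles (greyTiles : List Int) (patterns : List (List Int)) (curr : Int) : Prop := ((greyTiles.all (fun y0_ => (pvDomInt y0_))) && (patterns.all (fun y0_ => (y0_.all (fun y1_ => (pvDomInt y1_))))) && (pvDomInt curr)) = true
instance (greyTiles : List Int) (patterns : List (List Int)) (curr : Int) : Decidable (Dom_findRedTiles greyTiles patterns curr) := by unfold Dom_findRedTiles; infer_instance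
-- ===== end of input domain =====

-- B replaces A's recursive mutate/undo backtracking by an iterative DFS over an explicit
-- stack of (board, curr) frames (alternative decomposition, same cost); both Pythons
-- append to the caller's `patterns` list in place — the equivalence proved is about the
-- returned value.


-- ===== PORT A =====
def checkTilesRed (greyTiles : List Int) : Bool :=
  let redCount : Int :=
    (PySem.List.pyRange 0 (PySem.List.len greyTiles - 1) 1).foldl
      (fun rc i =>
        if PySem.List.pyGetD greyTiles i 0 = 1 ∧ PySem.List.pyGetD greyTiles (i + 1) 0 = 1
        then rc + 1 else rc) 0
  decide (1 ≤ redCount)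

-- A's recursion, structural in a fuel argument; `findRedTiles` supplies fuel exceeding
-- the depth bound (len + 2 - curr), so the 0-fuel branch is never taken.
def findRedTilesF : Nat → List Int → List (List Int) → Int → List (List Int)
  | 0, _, patterns, _ => patterns
  | fuel + 1, greyTiles, patterns, curr =>
    let patterns :=
      if checkTilesRed greyTiles ∧ greyTiles ∉ patterns then patterns ++ [greyTiles] else patterns
    if curr ≥ PySem.List.len greyTiles then patterns
    else
      let patterns :=
        if curr + 1 < PySem.List.len greyTiles ∧ PySem.List.pyGetD greyTiles curr 0 = 0 ∧
            PySem.List.pyGetD greyTiles (curr + 1) 0 = 0 then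
          -- greyTiles[curr] = 1; greyTiles[curr+1] = 1; recurse; then restore
          -- (immutably: pass the modified copy, keep greyTiles for the second call)
          findRedTilesF fuel (PySem.List.pySetD (PySem.List.pySetD greyTiles curr 1) (curr + 1) 1)
            patterns (curr + 2)
        else patterns
      findRedTilesF fuel greyTiles patterns (curr + 1)

def findRedTiles (greyTiles : List Int) (patterns : List (List Int)) (curr : Int) :
    List (List Int) :=
  findRedTilesF ((PySem.List.len greyTiles + 2 - curr).toNat + 1) greyTiles patterns curr

-- ===== PORT B =====
def checkRedB (n : Int) (board : List Int) : Bool :=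
  (PySem.List.pyRange 0 (n - 1) 1).any
    (fun i => PySem.List.pyGetD board i 0 == 1 && PySem.List.pyGetD board (i + 1) 0 == 1)

def bWeight (n : Int) (f : List Int × Int) : Nat := 3 ^ (n + 2 - f.2).toNat

-- B's stack loop, structural in a fuel argument; `findRedTiles_alt` supplies fuel
-- exceeding the total frame weight, so the 0-fuel branch is never taken.
def bLoopF : Nat → Int → List (List Int × Int) → List (List Int) → List (List Int)
  | 0, _, _, patterns => patterns
  | fuel + 1, n, stack, patterns =>
    match stack with
    | [] => patterns
    | (board, c) :: rest =>
      let patterns :=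
        if checkRedB n board ∧ board ∉ patterns then patterns ++ [board] else patterns
      if c ≥ n then bLoopF fuel n rest patterns
      else
        if c + 1 < n ∧ PySem.List.pyGetD board c 0 = 0 ∧ PySem.List.pyGetD board (c + 1) 0 = 0 then
          bLoopF fuel n
            ((PySem.List.pySetD (PySem.List.pySetD board c 1) (c + 1) 1, c + 2) ::
              (board, c + 1) :: rest) patterns
        else bLoopF fuel n ((board, c + 1) :: rest) patterns

def findRedTiles_alt (greyTiles : List Int) (patterns : List (List Int)) (curr : Int) :
    List (List Int) :=
  bLoopF (bWeight (PySem.List.len greyTiles) (greyTiles, curr) + 1)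
    (PySem.List.len greyTiles) [(greyTiles, curr)] patterns

-- ===== PRECONDITION & SPEC =====
-- Pre_ excludes exactly the inputs on which the Python A raises IndexError (and the
-- Python B raises IndexError at the same place): those with curr < -len(greyTiles) for a
-- nonempty board, and those with curr ≤ -2 for the empty board.  In each such case
-- curr + 1 < len(greyTiles) evaluates to True (e.g. for greyTiles = [] and curr = -2,
-- curr + 1 = -1 < 0 = len), so greyTiles[curr] is evaluated with curr below -len and
-- raises; A returns normally on every other input, and B matches A on all of them.
def Pre_findRedTiles (greyTiles : List Int) (patterns : List (List Int)) (curr : Int) : Prop :=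
  -(greyTiles.length : Int) ≤ curr ∨ (greyTiles = [] ∧ curr = -1)
instance (greyTiles : List Int) (patterns : List (List Int)) (curr : Int) :
    Decidable (Pre_findRedTiles greyTiles patterns curr) := by
  unfold Pre_findRedTiles; infer_instance

def pvWitness_findRedTiles : List Int × List (List Int) × Int := ([0, 0, 1, 1], [], 0)

def Spec_findRedTiles (greyTiles : List Int) (patterns : List (List Int)) (curr : Int) (out : List (List Int)) : Prop := out = findRedTiles_alt greyTiles patterns curr
instance (greyTiles : List Int) (patterns : List (List Int)) (curr : Int) (out : List (List Int)) : Decidable (Spec_findRedTiles greyTiles patterns curr out) := by unfold Spec_findRedTiles; infer_instance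

-- ===== CLAIM (what is proved, stated in full; the proofs are below) =====
def Claim_equal_findRedTiles : Prop := ∀ (greyTiles : List Int) (patterns : List (List Int)) (curr : Int), Dom_findRedTiles greyTiles patterns curr → Pre_findRedTiles greyTiles patterns curr → Spec_findRedTiles greyTiles patterns curr (findRedTiles greyTiles patterns curr)

-- ===== LEMMAS AND PROOFS =====

-- weight arithmetic for the stack loop
theorem weightB_pos (n c : Int) : 0 < (3 : Nat) ^ (n + 2 - c).toNat :=
  pow_pos (by norm_num) _

theorem weightB_lt_one (n c : Int) (h : ¬ c ≥ n) :
    (3 : Nat) ^ (n + 2 - (c + 1)).toNat < (3 : Nat) ^ (n + 2 - c).toNat := by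
  have hm : (n + 2 - c).toNat = (n - c).toNat + 2 := by omega
  have h1 : (n + 2 - (c + 1)).toNat = (n - c).toNat + 1 := by omega
  rw [hm, h1]
  exact Nat.pow_lt_pow_succ (by norm_num)

theorem weightB_lt_two (n c : Int) (h : ¬ c ≥ n) :
    (3 : Nat) ^ (n + 2 - (c + 2)).toNat + (3 : Nat) ^ (n + 2 - (c + 1)).toNat <
      (3 : Nat) ^ (n + 2 - c).toNat := by
  have hm : (n + 2 - c).toNat = (n - c).toNat + 2 := by omega
  have h1 : (n + 2 - (c + 1)).toNat = (n - c).toNat + 1 := by omega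
  have h2 : (n + 2 - (c + 2)).toNat = (n - c).toNat := by omega
  rw [hm, h1, h2]
  have h0 : 0 < (3 : Nat) ^ (n - c).toNat := pow_pos (by norm_num) _
  have e1 : (3 : Nat) ^ ((n - c).toNat + 1) = 3 * 3 ^ (n - c).toNat := by ring
  have e2 : (3 : Nat) ^ ((n - c).toNat + 2) = 9 * 3 ^ (n - c).toNat := by ring
  omega

-- the result of A's fuel recursion does not depend on the fuel, once it exceeds the depth bound
theorem findRedTilesF_fuel (f : Nat) :
    ∀ (f' : Nat) (g : List Int) (p : List (List Int)) (c : Int),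
      (PySem.List.len g + 2 - c).toNat < f → (PySem.List.len g + 2 - c).toNat < f' →
      findRedTilesF f g p c = findRedTilesF f' g p c := by
  induction f with
  | zero => intro f' g p c h _; omega
  | succ k ih =>
    intro f' g p c h h'
    match f' with
    | 0 => omega
    | f' + 1 =>
      rw [findRedTilesF, findRedTilesF]
      by_cases hc : c ≥ PySem.List.len g
      · rw [if_pos hc, if_pos hc]
      · rw [if_neg hc, if_neg hc]
        have hl2 : PySem.List.len (PySem.List.pySetD (PySem.List.pySetD g c 1) (c + 1) 1) =
            PySem.List.len g := by
          simp [PySem.List.len_eq, PySem.List.length_pySetD]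
        by_cases hp : c + 1 < PySem.List.len g ∧ PySem.List.pyGetD g c 0 = 0 ∧
            PySem.List.pyGetD g (c + 1) 0 = 0
        · rw [if_pos hp, if_pos hp,
            ih f' _ _ (c + 2) (by rw [hl2]; simp [PySem.List.len_eq] at hc h ⊢; omega)
              (by rw [hl2]; simp [PySem.List.len_eq] at hc h' ⊢; omega),
            ih f' g _ (c + 1) (by simp [PySem.List.len_eq] at hc h ⊢; omega)
              (by simp [PySem.List.len_eq] at hc h' ⊢; omega)]
        · rw [if_neg hp, if_neg hp,
            ih f' g _ (c + 1) (by simp [PySem.List.len_eq] at hc h ⊢; omega)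
              (by simp [PySem.List.len_eq] at hc h' ⊢; omega)]

-- the result of B's fuel loop does not depend on the fuel, once it exceeds the stack weight
theorem bLoopF_fuel (f : Nat) :
    ∀ (f' : Nat) (n : Int) (stack : List (List Int × Int)) (p : List (List Int)),
      (stack.map (bWeight n)).sum < f → (stack.map (bWeight n)).sum < f' →
      bLoopF f n stack p = bLoopF f' n stack p := by
  induction f with
  | zero => intro f' n stack p h _; omega
  | succ k ih =>
    intro f' n stack p h h'
    match f' with
    | 0 => omega
    | f' + 1 =>
      match stack with
      | [] => rw [bLoopF, bLoopF]
      | (board, c) :: rest =>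
        rw [bLoopF, bLoopF]
        simp only [List.map_cons, List.sum_cons, bWeight] at h h'
        have hw1 := weightB_pos n c
        by_cases hc : c ≥ n
        · rw [if_pos hc, if_pos hc]
          exact ih f' n rest _ (by omega) (by omega)
        · rw [if_neg hc, if_neg hc]
          have hw2 := weightB_lt_two n c hc
          have hw3 := weightB_lt_one n c hc
          by_cases hp : c + 1 < n ∧ PySem.List.pyGetD board c 0 = 0 ∧
              PySem.List.pyGetD board (c + 1) 0 = 0
          · rw [if_pos hp, if_pos hp]
            exact ih f' n _ _ (by simp only [List.map_cons, List.sum_cons, bWeight]; omega)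
              (by simp only [List.map_cons, List.sum_cons, bWeight]; omega)
          · rw [if_neg hp, if_neg hp]
            exact ih f' n _ _ (by simp only [List.map_cons, List.sum_cons, bWeight]; omega)
              (by simp only [List.map_cons, List.sum_cons, bWeight]; omega)

-- B's loop with canonical (always-sufficient) fuel
def bLoopC (n : Int) (stack : List (List Int × Int)) (patterns : List (List Int)) :
    List (List Int) :=
  bLoopF ((stack.map (bWeight n)).sum + 1) n stack patterns

theorem bLoopC_eq (f : Nat) (n : Int) (stack : List (List Int × Int)) (p : List (List Int))
    (h : (stack.map (bWeight n)).sum < f) : bLoopF f n stack p = bLoopC n stack p :=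
  bLoopF_fuel f _ n stack p h (Nat.lt_succ_self _)

-- A's counted check and B's `any` check agree when n is the board's length.
theorem checkRedB_eq (board : List Int) :
    checkRedB (PySem.List.len board) board = checkTilesRed board := by
  unfold checkRedB checkTilesRed
  have h := PySem.List.foldl_count_if
    (fun i => PySem.List.pyGetD board i 0 == 1 && PySem.List.pyGetD board (i + 1) 0 == 1)
    (PySem.List.pyRange 0 (PySem.List.len board - 1) 1) 0
  simp only [Bool.and_eq_true, beq_iff_eq] at h
  rw [h, zero_add]
  rcases hb : (PySem.List.pyRange 0 (PySem.List.len board - 1) 1).any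
      (fun i => PySem.List.pyGetD board i 0 == 1 && PySem.List.pyGetD board (i + 1) 0 == 1) with _ | _
  · simp only [List.any_eq_false, Bool.and_eq_true, beq_iff_eq] at hb
    have hz : (PySem.List.pyRange 0 (PySem.List.len board - 1) 1).countP
        (fun i => PySem.List.pyGetD board i 0 == 1 && PySem.List.pyGetD board (i + 1) 0 == 1) = 0 := by
      rw [List.countP_eq_zero]; intro a ha; simp only [Bool.and_eq_true, beq_iff_eq]; exact hb a ha
    rw [hz]; decide
  · simp only [List.any_eq_true, Bool.and_eq_true, beq_iff_eq] at hb
    have hp : 0 < (PySem.List.pyRange 0 (PySem.List.len board - 1) 1).countP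
        (fun i => PySem.List.pyGetD board i 0 == 1 && PySem.List.pyGetD board (i + 1) 0 == 1) := by
      rw [List.countP_pos_iff]; obtain ⟨a, ha, h1⟩ := hb
      exact ⟨a, ha, by simp [h1.1, h1.2]⟩
    symm; simp only [decide_eq_true_eq]; exact_mod_cast hp

-- One stack frame whose curr is past the end: B pops it, A's call returns at its base case.
theorem bLoop_base (n : Int) (board : List Int) (c : Int) (rest : List (List Int × Int))
    (patterns : List (List Int)) (hn : (board.length : Int) = n) (hc : c ≥ n) :
    bLoopC n ((board, c) :: rest) patterns = bLoopC n rest (findRedTiles board patterns c) := by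
  have hlen : PySem.List.len board = n := by simpa [PySem.List.len_eq] using hn
  have hck : checkRedB n board = checkTilesRed board := by rw [← hlen, checkRedB_eq]
  have hw1 := weightB_pos n c
  rw [bLoopC, bLoopF, findRedTiles, findRedTilesF, hck, hlen, if_pos hc, if_pos hc]
  exact bLoopC_eq _ n rest _ (by simp only [List.map_cons, List.sum_cons, bWeight] at *; omega)

-- One stack frame of B performs exactly one recursive call of A.
theorem bLoop_step (n : Int) (m : Nat) :
    ∀ (board : List Int) (c : Int) (rest : List (List Int × Int)) (patterns : List (List Int)),
      (n + 2 - c).toNat ≤ m → (board.length : Int) = n →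
      bLoopC n ((board, c) :: rest) patterns = bLoopC n rest (findRedTiles board patterns c) := by
  induction m with
  | zero =>
    intro board c rest p hm hn
    exact bLoop_base n board c rest p hn (by omega)
  | succ k ih =>
    intro board c rest p hm hn
    by_cases hc : c ≥ n
    · exact bLoop_base n board c rest p hn hc
    · have hlen : PySem.List.len board = n := by simpa [PySem.List.len_eq] using hn
      have hck : checkRedB n board = checkTilesRed board := by rw [← hlen, checkRedB_eq]
      have hw1 := weightB_pos n c
      have hw2 := weightB_lt_two n c hc
      have hw3 := weightB_lt_one n c hc
      rw [bLoopC, bLoopF, findRedTiles, findRedTilesF, hck, hlen, if_neg hc, if_neg hc]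
      have hl2 : (PySem.List.pySetD (PySem.List.pySetD board c 1) (c + 1) 1).length = board.length :=
        by simp [PySem.List.length_pySetD]
      by_cases hpl : c + 1 < n ∧ PySem.List.pyGetD board c 0 = 0 ∧
          PySem.List.pyGetD board (c + 1) 0 = 0
      · have hfa : ∀ q : List (List Int), findRedTilesF ((n + 2 - c).toNat)
            (PySem.List.pySetD (PySem.List.pySetD board c 1) (c + 1) 1) q (c + 2) =
            findRedTiles (PySem.List.pySetD (PySem.List.pySetD board c 1) (c + 1) 1) q (c + 2) := by
          intro q
          rw [findRedTiles]
          exact findRedTilesF_fuel _ _ _ _ _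
            (by simp only [PySem.List.len_eq, hl2, hn]; omega)
            (by simp only [PySem.List.len_eq, hl2, hn]; omega)
        have hfb : ∀ q : List (List Int), findRedTilesF ((n + 2 - c).toNat) board q (c + 1) =
            findRedTiles board q (c + 1) := by
          intro q
          rw [findRedTiles]
          exact findRedTilesF_fuel _ _ _ _ _
            (by simp only [PySem.List.len_eq, hn]; omega)
            (by simp only [PySem.List.len_eq, hn]; omega)
        rw [if_pos hpl, if_pos hpl]
        rw [bLoopC_eq _ n _ _ (by simp only [List.map_cons, List.sum_cons, bWeight]; omega)]
        rw [ih (PySem.List.pySetD (PySem.List.pySetD board c 1) (c + 1) 1) (c + 2) _ _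
            (by omega) (by rw [hl2]; exact hn)]
        rw [ih board (c + 1) rest _ (by omega) hn]
        rw [hfa, hfb]
      · have hfb : ∀ q : List (List Int), findRedTilesF ((n + 2 - c).toNat) board q (c + 1) =
            findRedTiles board q (c + 1) := by
          intro q
          rw [findRedTiles]
          exact findRedTilesF_fuel _ _ _ _ _
            (by simp only [PySem.List.len_eq, hn]; omega)
            (by simp only [PySem.List.len_eq, hn]; omega)
        rw [if_neg hpl, if_neg hpl]
        rw [bLoopC_eq _ n _ _ (by simp only [List.map_cons, List.sum_cons, bWeight]; omega)]
        rw [ih board (c + 1) rest _ (by omega) hn]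
        rw [hfb]

-- ===== VERDICT (by name: the statement is the Claim_ definition above) =====
theorem findRedTiles_spec : Claim_equal_findRedTiles := by
  intro g p curr _ _
  unfold Spec_findRedTiles findRedTiles_alt
  rw [bLoopC_eq (bWeight (PySem.List.len g) (g, curr) + 1) (PySem.List.len g) [(g, curr)] p
      (by simp only [List.map_cons, List.map_nil, List.sum_cons, List.sum_nil]; omega),
    bLoop_step (PySem.List.len g) ((PySem.List.len g) + 2 - curr).toNat g curr [] p
      le_rfl (by simp [PySem.List.len_eq])]
  rfl
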